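-- pv_equiv track=rewrite | github.com/pc956/Pierre | backend/plu_scoring.py | _classify_zone
-- ===== SOURCE A (Python) =====
-- HARD_EXCLUSION_ZONES = {
--     "N", "NL", "Nh", "Nl", "A", "Ap", "A0",
--     "Nd", "Ns", "Nf", "Nc", "Ne",
--     "Ab", "Ac", "Ah",
-- }
--
-- RESIDENTIAL_ZONES = {
--     "UA", "UB", "UC", "UD", "UH", "UR",
--     "UAa", "UAb", "UBa", "UBb", "UCa", "UCb", "UDa", "UDb",
--     "UHa", "UHb",
-- }
--
-- INDUSTRIAL_ZONES = {
--     "UI", "UX", "UY", "UZ", "UE", "UF", "UP",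
--     "UIa", "UIb", "UIc", "UXa", "UXb", "UYa", "UYb",
--     "UZa", "UZb", "UEa", "UEb", "UFa", "UFb",
--     "UPa", "UPb", "UPm",
--     "Ui", "Ux", "Uy", "Uz", "Ue", "Uf",
-- }
--
-- AU_ZONES = {
--     "AU", "AUI", "AUX", "AUY", "AUZ", "AUE",
--     "1AU", "2AU", "1AUI", "2AUI", "1AUX", "2AUX",
--     "AUa", "AUb", "AUc", "AUi", "AUx", "AUy",
--     "1AUa", "1AUb", "1AUi", "2AUa", "2AUi",
--     "NAi",
-- }
--
-- MIXED_TERTIARY_ZONES = {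
--     "UM", "UT", "UC", "UV",
--     "UMa", "UMb", "UTa", "UTb",
--     "UCa", "UCb", "UVa",
--     "Um", "Ut",
--     "UG", "UGa",
-- }
--
-- def _normalize_zone(code: str) -> str:
--     """Normalise le code de zone PLU."""
--     if not code:
--         return ""
--     return code.strip()
--
-- def _classify_zone(code: str) -> str:
--     """Classifie une zone PLU en catégorie."""
--     c = _normalize_zone(code)
--     cu = c.upper()
--
--     if c in HARD_EXCLUSION_ZONES or cu in {z.upper() for z in HARD_EXCLUSION_ZONES}:
--         return "excluded"
--
--     if c in RESIDENTIAL_ZONES or cu in {z.upper() for z in RESIDENTIAL_ZONES}: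
--         return "residential"
--
--     if c in INDUSTRIAL_ZONES or cu in {z.upper() for z in INDUSTRIAL_ZONES}:
--         return "industrial"
--
--     if c in AU_ZONES or cu in {z.upper() for z in AU_ZONES}:
--         return "au"
--
--     if c in MIXED_TERTIARY_ZONES or cu in {z.upper() for z in MIXED_TERTIARY_ZONES}:
--         return "mixed"
--
--     # Fallback pattern matching
--     if cu.startswith("UI") or cu.startswith("UX") or cu.startswith("UY") or cu.startswith("UZ") or cu.startswith("UE") or cu.startswith("UF"):
--         return "industrial"
--     if cu.startswith("AU"):
--         return "au"
--     if cu.startswith("N"):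
--         return "excluded"
--     if cu.startswith("A") and not cu.startswith("AU"):
--         return "excluded"
--     if cu.startswith("U"):
--         # Generic U zone — check if residential or other
--         if cu in ("UA", "UB", "UC", "UD", "UH", "UR"):
--             return "residential"
--         return "mixed"
--
--     return "unknown"
-- ===== SOURCE B (Python) =====
-- # Same classification via a single precedence-resolved lookup table plus a prefix table.
-- HARD_EXCLUSION_ZONES = {
--     "N", "NL", "Nh", "Nl", "A", "Ap", "A0",
--     "Nd", "Ns", "Nf", "Nc", "Ne",
--     "Ab", "Ac", "Ah",
-- }
--
-- RESIDENTIAL_ZONES = {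
--     "UA", "UB", "UC", "UD", "UH", "UR",
--     "UAa", "UAb", "UBa", "UBb", "UCa", "UCb", "UDa", "UDb",
--     "UHa", "UHb",
-- }
--
-- INDUSTRIAL_ZONES = {
--     "UI", "UX", "UY", "UZ", "UE", "UF", "UP",
--     "UIa", "UIb", "UIc", "UXa", "UXb", "UYa", "UYb",
--     "UZa", "UZb", "UEa", "UEb", "UFa", "UFb",
--     "UPa", "UPb", "UPm",
--     "Ui", "Ux", "Uy", "Uz", "Ue", "Uf",
-- }
--
-- AU_ZONES = {
--     "AU", "AUI", "AUX", "AUY", "AUZ", "AUE",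
--     "1AU", "2AU", "1AUI", "2AUI", "1AUX", "2AUX",
--     "AUa", "AUb", "AUc", "AUi", "AUx", "AUy",
--     "1AUa", "1AUb", "1AUi", "2AUa", "2AUi",
--     "NAi",
-- }
--
-- MIXED_TERTIARY_ZONES = {
--     "UM", "UT", "UC", "UV",
--     "UMa", "UMb", "UTa", "UTb",
--     "UCa", "UCb", "UVa",
--     "Um", "Ut",
--     "UG", "UGa",
-- }
--
-- # Uppercased-code -> category table; later (higher-precedence) categories overwrite earlier ones.
-- ZONE_TO_CATEGORY = {}
-- for _cat, _zones in [
--     ("mixed", MIXED_TERTIARY_ZONES),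
--     ("au", AU_ZONES),
--     ("industrial", INDUSTRIAL_ZONES),
--     ("residential", RESIDENTIAL_ZONES),
--     ("excluded", HARD_EXCLUSION_ZONES),
-- ]:
--     for _z in _zones:
--         ZONE_TO_CATEGORY[_z.upper()] = _cat
--
-- # Prefix fallback table, first match wins.
-- PREFIX_CATEGORIES = [
--     ("UI", "industrial"), ("UX", "industrial"), ("UY", "industrial"),
--     ("UZ", "industrial"), ("UE", "industrial"), ("UF", "industrial"),
--     ("AU", "au"), ("N", "excluded"), ("A", "excluded"), ("U", "mixed"),
-- ]
--
-- def _classify_zone(code: str) -> str: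
--     """Classifie une zone PLU en catégorie."""
--     cu = code.strip().upper()
--     hit = ZONE_TO_CATEGORY.get(cu)
--     if hit is not None:
--         return hit
--     for prefix, cat in PREFIX_CATEGORIES:
--         if cu.startswith(prefix):
--             return cat
--     return "unknown"
-- ===== Notes on version B (the rewrite author's own statement) =====
-- stated objective: simpler
-- what changed: Replaced the five sequential set-membership branches (each rebuilding an uppercased set) by one precomputed uppercased-code-to-category dict built in reverse precedence order, and the hand-written prefix if-chain by a first-match scan of a prefix table.
import Mathlib
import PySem

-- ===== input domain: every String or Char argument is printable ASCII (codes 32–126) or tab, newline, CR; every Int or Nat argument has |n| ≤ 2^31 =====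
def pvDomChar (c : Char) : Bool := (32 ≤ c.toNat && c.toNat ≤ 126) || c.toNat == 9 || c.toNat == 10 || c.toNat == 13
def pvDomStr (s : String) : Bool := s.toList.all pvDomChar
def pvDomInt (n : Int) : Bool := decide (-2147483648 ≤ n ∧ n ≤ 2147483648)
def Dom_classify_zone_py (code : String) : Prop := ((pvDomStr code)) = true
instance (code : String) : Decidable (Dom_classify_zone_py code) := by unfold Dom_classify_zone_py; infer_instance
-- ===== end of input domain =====

-- B replaces A's five membership branches by one precomputed uppercased-code→category dict
-- plus a prefix-table scan for the fallback; same return value, simpler control flow.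

-- ===== PORT A =====
def pv_hard : PySem.Set String := PySem.Set.ofList
  ["N", "NL", "Nh", "Nl", "A", "Ap", "A0", "Nd", "Ns", "Nf", "Nc", "Ne", "Ab", "Ac", "Ah"]

def pv_res : PySem.Set String := PySem.Set.ofList
  ["UA", "UB", "UC", "UD", "UH", "UR", "UAa", "UAb", "UBa", "UBb", "UCa", "UCb", "UDa", "UDb", "UHa", "UHb"]

def pv_ind : PySem.Set String := PySem.Set.ofList
  ["UI", "UX", "UY", "UZ", "UE", "UF", "UP", "UIa", "UIb", "UIc", "UXa", "UXb", "UYa", "UYb",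
   "UZa", "UZb", "UEa", "UEb", "UFa", "UFb", "UPa", "UPb", "UPm", "Ui", "Ux", "Uy", "Uz", "Ue", "Uf"]

def pv_au : PySem.Set String := PySem.Set.ofList
  ["AU", "AUI", "AUX", "AUY", "AUZ", "AUE", "1AU", "2AU", "1AUI", "2AUI", "1AUX", "2AUX",
   "AUa", "AUb", "AUc", "AUi", "AUx", "AUy", "1AUa", "1AUb", "1AUi", "2AUa", "2AUi", "NAi"]

def pv_mixed : PySem.Set String := PySem.Set.ofList
  ["UM", "UT", "UC", "UV", "UMa", "UMb", "UTa", "UTb", "UCa", "UCb", "UVa", "Um", "Ut", "UG", "UGa"]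

def pv_normalize_zone (code : String) : String :=
  if code = "" then "" else PySem.Str.strip code

def classify_zone_py (code : String) : String :=
  let c := pv_normalize_zone code
  let cu := PySem.Str.upper c
  if c ∈ pv_hard ∨ cu ∈ PySem.Set.ofList (pv_hard.map PySem.Str.upper) then "excluded"
  else if c ∈ pv_res ∨ cu ∈ PySem.Set.ofList (pv_res.map PySem.Str.upper) then "residential"
  else if c ∈ pv_ind ∨ cu ∈ PySem.Set.ofList (pv_ind.map PySem.Str.upper) then "industrial"
  else if c ∈ pv_au ∨ cu ∈ PySem.Set.ofList (pv_au.map PySem.Str.upper) then "au"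
  else if c ∈ pv_mixed ∨ cu ∈ PySem.Set.ofList (pv_mixed.map PySem.Str.upper) then "mixed"
  else if PySem.Str.startswith cu "UI" || PySem.Str.startswith cu "UX" || PySem.Str.startswith cu "UY"
       || PySem.Str.startswith cu "UZ" || PySem.Str.startswith cu "UE" || PySem.Str.startswith cu "UF" then "industrial"
  else if PySem.Str.startswith cu "AU" then "au"
  else if PySem.Str.startswith cu "N" then "excluded"
  else if PySem.Str.startswith cu "A" && !PySem.Str.startswith cu "AU" then "excluded"
  else if PySem.Str.startswith cu "U" then
    if cu ∈ ["UA", "UB", "UC", "UD", "UH", "UR"] then "residential" else "mixed"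
  else "unknown"

-- ===== PORT B =====
-- uppercased-code → category table; later (higher-precedence) categories overwrite earlier ones
def pv_table : PySem.Dict String String :=
  ([("mixed", pv_mixed), ("au", pv_au), ("industrial", pv_ind),
    ("residential", pv_res), ("excluded", pv_hard)] : List (String × List String)).foldl
    (fun d p => p.2.foldl (fun d z => d.insert (PySem.Str.upper z) p.1) d) PySem.Dict.empty

-- prefix fallback table, first match wins
def pv_prefixes : List (String × String) :=
  [("UI", "industrial"), ("UX", "industrial"), ("UY", "industrial"),
   ("UZ", "industrial"), ("UE", "industrial"), ("UF", "industrial"),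
   ("AU", "au"), ("N", "excluded"), ("A", "excluded"), ("U", "mixed")]

-- first prefix match in the table, else "unknown" (the for-loop in Source B)
def pv_prefix_fallback (cu : String) : String :=
  match pv_prefixes.find? (fun pc => PySem.Str.startswith cu pc.1) with
  | some pc => pc.2
  | none => "unknown"

-- "if hit is not None: return hit" else fall back
def pv_hit_case (cu : String) : Option String → String
  | some cat => cat
  | none => pv_prefix_fallback cu

def classify_zone_py_alt (code : String) : String :=
  let cu := PySem.Str.upper (PySem.Str.strip code)
  pv_hit_case cu (pv_table.get? cu)

-- ===== PRECONDITION & SPEC =====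
def Spec_classify_zone_py (code : String) (out : String) : Prop := out = classify_zone_py_alt code
instance (code : String) (out : String) : Decidable (Spec_classify_zone_py code out) := by unfold Spec_classify_zone_py; infer_instance

-- ===== CLAIM (what is proved, stated in full; the proofs are below) =====
def Claim_equal_classify_zone_py : Prop := ∀ (code : String), Dom_classify_zone_py code → Spec_classify_zone_py code (classify_zone_py code)

-- ===== LEMMAS AND PROOFS =====

-- A's "c in S or cu in {z.upper() for z in S}" collapses to the uppercased membership
theorem pv_cond_iff (s : String) (L : List String) :
    (s ∈ L ∨ PySem.Str.upper s ∈ PySem.Set.ofList (L.map PySem.Str.upper)) ↔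
      PySem.Str.upper s ∈ L.map PySem.Str.upper := by
  constructor
  · rintro (h | h)
    · exact List.mem_map_of_mem h
    · exact (PySem.Set.mem_ofList _ _).mp h
  · intro h
    exact Or.inr ((PySem.Set.mem_ofList _ _).mpr h)

set_option maxRecDepth 16384 in
theorem pv_cond_iff' (s cu : String) (hcu : PySem.Str.upper s = cu) (L : List String) :
    (s ∈ L ∨ cu ∈ PySem.Set.ofList (L.map PySem.Str.upper)) ↔ cu ∈ L.map PySem.Str.upper := by
  subst hcu
  exact pv_cond_iff s L

set_option maxRecDepth 100000 in
theorem pv_table_hard : ∀ k ∈ pv_hard.map PySem.Str.upper, pv_table.get? k = some "excluded" := by decide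
set_option maxRecDepth 16384 in
theorem pv_table_res : ∀ k ∈ pv_res.map PySem.Str.upper, pv_table.get? k = some "residential" := by decide
set_option maxRecDepth 16384 in
theorem pv_table_ind : ∀ k ∈ pv_ind.map PySem.Str.upper, pv_table.get? k = some "industrial" := by decide
set_option maxRecDepth 16384 in
theorem pv_table_au : ∀ k ∈ pv_au.map PySem.Str.upper, pv_table.get? k = some "au" := by decide
set_option maxRecDepth 16384 in
theorem pv_table_mixed : ∀ k ∈ pv_mixed.map PySem.Str.upper,
    k ∉ pv_res.map PySem.Str.upper → pv_table.get? k = some "mixed" := by decide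

set_option maxRecDepth 100000 in
theorem pv_keys_lit : pv_table.keys = (["UM", "UT", "UC", "UV", "UMA", "UMB", "UTA", "UTB", "UCA", "UCB", "UVA", "UG", "UGA", "AU", "AUI", "AUX", "AUY", "AUZ", "AUE", "1AU", "2AU", "1AUI", "2AUI", "1AUX", "2AUX", "AUA", "AUB", "AUC", "1AUA", "1AUB", "2AUA", "NAI", "UI", "UX", "UY", "UZ", "UE", "UF", "UP", "UIA", "UIB", "UIC", "UXA", "UXB", "UYA", "UYB", "UZA", "UZB", "UEA", "UEB", "UFA", "UFB", "UPA", "UPB", "UPM", "UA", "UB", "UD", "UH", "UR", "UAA", "UAB", "UBA", "UBB", "UDA", "UDB", "UHA", "UHB", "N", "NL", "NH", "A", "AP", "A0", "ND", "NS", "NF", "NC", "NE", "AB", "AC", "AH"] : List String) := by rfl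

set_option maxRecDepth 100000 in
theorem pv_keys_sub : ∀ k ∈ pv_table.keys,
    k ∈ pv_hard.map PySem.Str.upper ∨ k ∈ pv_res.map PySem.Str.upper ∨ k ∈ pv_ind.map PySem.Str.upper ∨
    k ∈ pv_au.map PySem.Str.upper ∨ k ∈ pv_mixed.map PySem.Str.upper := by
  rw [pv_keys_lit]; decide

set_option maxRecDepth 100000 in
theorem pv_main (code : String) : classify_zone_py code = classify_zone_py_alt code := by
  have hnorm : pv_normalize_zone code = PySem.Str.strip code := by
    unfold pv_normalize_zone
    split
    · simp_all
      decide
    · rfl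
  simp only [classify_zone_py, classify_zone_py_alt]
  rw [hnorm]
  generalize PySem.Str.strip code = s
  generalize hcu : PySem.Str.upper s = cu
  by_cases h1 : cu ∈ pv_hard.map PySem.Str.upper
  · rw [if_pos ((pv_cond_iff' s cu hcu pv_hard).mpr h1), pv_table_hard cu h1]
    rfl
  by_cases h2 : cu ∈ pv_res.map PySem.Str.upper
  · rw [if_neg ((pv_cond_iff' s cu hcu pv_hard).not.mpr h1),
        if_pos ((pv_cond_iff' s cu hcu pv_res).mpr h2), pv_table_res cu h2]
    rfl
  by_cases h3 : cu ∈ pv_ind.map PySem.Str.upper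
  · rw [if_neg ((pv_cond_iff' s cu hcu pv_hard).not.mpr h1),
        if_neg ((pv_cond_iff' s cu hcu pv_res).not.mpr h2),
        if_pos ((pv_cond_iff' s cu hcu pv_ind).mpr h3), pv_table_ind cu h3]
    rfl
  by_cases h4 : cu ∈ pv_au.map PySem.Str.upper
  · rw [if_neg ((pv_cond_iff' s cu hcu pv_hard).not.mpr h1),
        if_neg ((pv_cond_iff' s cu hcu pv_res).not.mpr h2),
        if_neg ((pv_cond_iff' s cu hcu pv_ind).not.mpr h3),
        if_pos ((pv_cond_iff' s cu hcu pv_au).mpr h4), pv_table_au cu h4]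
    rfl
  by_cases h5 : cu ∈ pv_mixed.map PySem.Str.upper
  · rw [if_neg ((pv_cond_iff' s cu hcu pv_hard).not.mpr h1),
        if_neg ((pv_cond_iff' s cu hcu pv_res).not.mpr h2),
        if_neg ((pv_cond_iff' s cu hcu pv_ind).not.mpr h3),
        if_neg ((pv_cond_iff' s cu hcu pv_au).not.mpr h4),
        if_pos ((pv_cond_iff' s cu hcu pv_mixed).mpr h5), pv_table_mixed cu h5 h2]
    rfl
  have hnone : pv_table.get? cu = none := by
    rw [PySem.Dict.get?_eq_none_iff_not_mem_keys]
    intro hk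
    rcases pv_keys_sub cu hk with h | h | h | h | h
    exacts [h1 h, h2 h, h3 h, h4 h, h5 h]
  rw [if_neg ((pv_cond_iff' s cu hcu pv_hard).not.mpr h1),
      if_neg ((pv_cond_iff' s cu hcu pv_res).not.mpr h2),
      if_neg ((pv_cond_iff' s cu hcu pv_ind).not.mpr h3),
      if_neg ((pv_cond_iff' s cu hcu pv_au).not.mpr h4),
      if_neg ((pv_cond_iff' s cu hcu pv_mixed).not.mpr h5), hnone]
  have hres : cu ∉ (["UA", "UB", "UC", "UD", "UH", "UR"] : List String) := by
    intro hm
    apply h2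
    fin_cases hm <;> decide
  simp only [pv_hit_case, pv_prefix_fallback, pv_prefixes]
  by_cases hUI : PySem.Chars.startswith cu.toList ['U', 'I']
  · simp [List.find?, hUI]
  by_cases hUX : PySem.Chars.startswith cu.toList ['U', 'X']
  · simp [List.find?, hUI, hUX]
  by_cases hUY : PySem.Chars.startswith cu.toList ['U', 'Y']
  · simp [List.find?, hUI, hUX, hUY]
  by_cases hUZ : PySem.Chars.startswith cu.toList ['U', 'Z']
  · simp [List.find?, hUI, hUX, hUY, hUZ]
  by_cases hUE : PySem.Chars.startswith cu.toList ['U', 'E']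
  · simp [List.find?, hUI, hUX, hUY, hUZ, hUE]
  by_cases hUF : PySem.Chars.startswith cu.toList ['U', 'F']
  · simp [List.find?, hUI, hUX, hUY, hUZ, hUE, hUF]
  by_cases hAU : PySem.Chars.startswith cu.toList ['A', 'U']
  · simp [List.find?, hUI, hUX, hUY, hUZ, hUE, hUF, hAU]
  by_cases hN : PySem.Chars.startswith cu.toList ['N']
  · simp [List.find?, hUI, hUX, hUY, hUZ, hUE, hUF, hAU, hN]
  by_cases hA : PySem.Chars.startswith cu.toList ['A']
  · simp [List.find?, hUI, hUX, hUY, hUZ, hUE, hUF, hAU, hN, hA]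
  by_cases hU : PySem.Chars.startswith cu.toList ['U']
  · simp [List.find?, hUI, hUX, hUY, hUZ, hUE, hUF, hAU, hN, hA, hU, hres]
  simp [List.find?, hUI, hUX, hUY, hUZ, hUE, hUF, hAU, hN, hA, hU]

-- ===== VERDICT (by name: the statement is the Claim_ definition above) =====
theorem classify_zone_py_spec : Claim_equal_classify_zone_py := by
  intro code _
  unfold Spec_classify_zone_py
  exact pv_main code
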